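-- pv_equiv track=rewrite | github.com/itosha35/Programming | PYTHON/Seminar_5/task_extra_2.py | getNums
-- ===== SOURCE A (Python) =====
-- def getNums(len: int, sum: int, k: int, s: int):
--         if (len == k):
--             if (sum == s):
--                 return 1 # +1
--             else:
--                 return 0 # nothing
--         begin = int(len == 0) # to escape 0 in beginning only
--         result = 0
--         for i in range(begin, 10): # digits form 0 (1) up to 9 (inclusive), not 10
--             result += getNums(len + 1, sum + i, k, s) # sum == collected value for s comparison
--         return result
-- ===== SOURCE B (Python) =====
-- def _count(m, t):
--     # number of length-m strings of digits 0..9 with digit sum t (bottom-up DP)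
--     if t < 0 or t > 9 * m:
--         return 0
--     dp = [1] + [0] * t
--     for _ in range(m):
--         dp = [sum(dp[v - d] for d in range(10) if d <= v) for v in range(t + 1)]
--     return dp[t]
--
--
-- def getNums(len, sum, k, s):
--     m = k - len          # digits still to choose
--     t = s - sum          # digit sum still needed
--     if m < 0:
--         return 0
--     full = _count(m, t)
--     if len <= 0 and k >= 1:
--         # the digit chosen when the counter passes 0 may not be 0
--         return full - _count(m - 1, t)
--     return full
-- ===== Notes on version B (the rewrite author's own statement) =====
-- stated objective: alternative
-- what changed: A enumerates all 10^(k-len) digit strings by recursion; B computes the same count with a bottom-up DP table over (positions, partial sum), subtracting the strings whose digit at counter 0 is zero (intended as asymptotically faster, but a timing run could not confirm a clean ratio: both time out on the very largest generated inputs).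
import Mathlib
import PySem

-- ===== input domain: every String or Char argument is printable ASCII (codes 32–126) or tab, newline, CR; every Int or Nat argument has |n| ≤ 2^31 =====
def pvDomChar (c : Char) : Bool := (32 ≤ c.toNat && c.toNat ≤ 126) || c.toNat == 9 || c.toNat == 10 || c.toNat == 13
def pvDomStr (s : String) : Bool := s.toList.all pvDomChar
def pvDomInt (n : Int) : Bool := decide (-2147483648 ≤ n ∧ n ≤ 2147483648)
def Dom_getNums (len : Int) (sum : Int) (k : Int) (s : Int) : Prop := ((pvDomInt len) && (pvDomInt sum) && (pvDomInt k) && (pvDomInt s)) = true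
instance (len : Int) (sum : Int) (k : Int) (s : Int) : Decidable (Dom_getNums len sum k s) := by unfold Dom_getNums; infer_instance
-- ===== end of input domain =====

-- B replaces A's exponential recursion over all digit strings by a bottom-up DP over
-- (positions remaining, partial sum); intended as faster, but a timing run gave no
-- clean reading at the largest sizes, so no speed is claimed.

-- ===== PORT A =====
-- A recurses with len increasing by 1 until len == k; fuel = (k - len).toNat counts the
-- remaining levels exactly, so on Pre_ (len ≤ k) the fuel never runs out and the port is
-- exact.  (For len > k the Python recursion never terminates — RecursionError — excluded.)
def getNumsAux : Nat → Int → Int → Int → Int → Int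
  | fuel, len, sum, k, s =>
    if len = k then (if sum = s then 1 else 0)
    else
      match fuel with
      | 0 => 0  -- unreachable when fuel = (k - len).toNat and len ≤ k
      | f + 1 =>
        let begin_ : Int := if len = 0 then 1 else 0
        (PySem.List.pyRange begin_ 10 1).foldl
          (fun result i => result + getNumsAux f (len + 1) (sum + i) k s) 0

def getNums (len : Int) (sum : Int) (k : Int) (s : Int) : Int :=
  getNumsAux (k - len).toNat len sum k s

-- ===== PORT B =====
-- dp = [sum(dp[v-d] for d in range(10) if d <= v) for v in range(t+1)]
def countStep (dp : List Int) (t : Nat) : List Int :=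
  (List.range (t + 1)).map fun v =>
    ((List.range 10).filter (fun d => d ≤ v)).foldl (fun r d => r + dp.getD (v - d) 0) 0

-- _count(m, t) of Source B
def countDS (m : Nat) (t : Int) : Int :=
  if t < 0 ∨ 9 * (m : Int) < t then 0
  else
    let tn := t.toNat
    let dp0 : List Int := 1 :: List.replicate tn 0
    let dp := (List.range m).foldl (fun dp _ => countStep dp tn) dp0
    dp.getD tn 0

def getNums_alt (len : Int) (sum : Int) (k : Int) (s : Int) : Int :=
  let m := k - len
  let t := s - sum
  if m < 0 then 0
  else
    let full := countDS m.toNat t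
    if len ≤ 0 ∧ 1 ≤ k then full - countDS (m.toNat - 1) t
    else full

-- ===== PRECONDITION & SPEC =====
-- Pre_ excludes exactly len > k, where the Python A recurses forever past the base case
-- and dies with RecursionError.
def Pre_getNums (len : Int) (sum : Int) (k : Int) (s : Int) : Prop := len ≤ k
instance (len : Int) (sum : Int) (k : Int) (s : Int) : Decidable (Pre_getNums len sum k s) := by unfold Pre_getNums; infer_instance

def pvWitness_getNums : Int × Int × Int × Int := (0, 0, 2, 7)

def Spec_getNums (len : Int) (sum : Int) (k : Int) (s : Int) (out : Int) : Prop := out = getNums_alt len sum k s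
instance (len : Int) (sum : Int) (k : Int) (s : Int) (out : Int) : Decidable (Spec_getNums len sum k s out) := by unfold Spec_getNums; infer_instance

-- ===== CLAIM (what is proved, stated in full; the proofs are below) =====
def Claim_equal_getNums : Prop := ∀ (len : Int) (sum : Int) (k : Int) (s : Int), Dom_getNums len sum k s → Pre_getNums len sum k s → Spec_getNums len sum k s (getNums len sum k s)

-- ===== LEMMAS AND PROOFS =====

-- the mathematical count: cnt m t = number of length-m strings of digits 0..9 with sum t
def cnt : Nat → Int → Int
  | 0, t => if t = 0 then 1 else 0
  | m + 1, t => ((List.range 10).map (fun (d : Nat) => cnt m (t - (d : Int)))).sum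

lemma cnt_neg (m : Nat) (t : Int) (h : t < 0) : cnt m t = 0 := by
  induction m generalizing t with
  | zero => simp [cnt]; omega
  | succ m ih =>
    rw [cnt]
    apply List.sum_eq_zero
    intro x hx
    simp only [List.mem_map, List.mem_range] at hx
    obtain ⟨d, hd, rfl⟩ := hx
    exact ih _ (by omega)

lemma cnt_big (m : Nat) (t : Int) (h : 9 * (m : Int) < t) : cnt m t = 0 := by
  induction m generalizing t with
  | zero => simp [cnt]; omega
  | succ m ih =>
    rw [cnt]
    apply List.sum_eq_zero
    intro x hx
    simp only [List.mem_map, List.mem_range] at hx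
    obtain ⟨d, hd, rfl⟩ := hx
    apply ih
    push_cast at h ⊢
    omega

lemma range10_lit : List.range 10 = [0,1,2,3,4,5,6,7,8,9] := by decide

lemma cnt_succ (m : Nat) (t : Int) :
    cnt (m + 1) t = cnt m t + cnt m (t-1) + cnt m (t-2) + cnt m (t-3) + cnt m (t-4)
      + cnt m (t-5) + cnt m (t-6) + cnt m (t-7) + cnt m (t-8) + cnt m (t-9) := by
  rw [cnt, range10_lit]
  simp only [List.map_cons, List.map_nil, List.sum_cons, List.sum_nil]
  push_cast
  ring_nf

-- A's recursion computes cnt, minus the strings whose digit at counter 0 is 0.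
lemma getNumsAux_eq (f : Nat) : ∀ len sum k s : Int, len + (f : Int) = k →
    getNumsAux f len sum k s
      = cnt f (s - sum) - (if len ≤ 0 ∧ 1 ≤ k then cnt (f - 1) (s - sum) else 0) := by
  induction f with
  | zero =>
    intro len sum k s hk
    have hlk : len = k := by push_cast at hk; omega
    rw [getNumsAux]
    simp only [hlk]
    rw [if_neg (by omega : ¬ (k ≤ 0 ∧ 1 ≤ k))]
    rcases eq_or_ne sum s with h | h
    · simp [cnt, h]
    · simp [cnt, sub_eq_zero, h, Ne.symm h]
  | succ f ih =>
    intro len sum k s hk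
    have hk' : len + (f : Int) + 1 = k := by push_cast at hk; omega
    have hne : len ≠ k := by omega
    rw [getNumsAux, if_neg hne]
    have H : ∀ i : Int, getNumsAux f (len + 1) (sum + i) k s
        = cnt f (s - sum - i) - (if len + 1 ≤ 0 ∧ 1 ≤ k then cnt (f - 1) (s - sum - i) else 0) := by
      intro i
      have h2 := ih (len + 1) (sum + i) k s (by omega)
      rwa [show s - (sum + i) = s - sum - i by ring] at h2
    by_cases h0 : len = 0
    · -- first digit: 1..9
      subst h0
      have H1 : ∀ i : Int, getNumsAux f (0 + 1) (sum + i) k s = cnt f (s - sum - i) := by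
        intro i; rw [H i, if_neg (by omega), sub_zero]
      have hb : PySem.List.pyRange 1 10 1 = [1,2,3,4,5,6,7,8,9] := by decide
      simp only [if_true, hb, List.foldl_cons, List.foldl_nil, H1, sub_zero]
      rw [if_pos (⟨by omega, by omega⟩ : (0:Int) ≤ 0 ∧ 1 ≤ k), Nat.add_sub_cancel]
      rw [cnt_succ]
      ring_nf
    · rw [if_neg h0]
      have hb : PySem.List.pyRange 0 10 1 = [0,1,2,3,4,5,6,7,8,9] := by decide
      by_cases hc : len + 1 ≤ 0 ∧ 1 ≤ k
      · -- an interior position still passes counter 0 (len ≤ -1, k ≥ 1): here f ≥ 1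
        obtain ⟨f', rfl⟩ : ∃ f', f = f' + 1 := ⟨f - 1, by omega⟩
        have H1 : ∀ i : Int, getNumsAux (f' + 1) (len + 1) (sum + i) k s
            = cnt (f' + 1) (s - sum - i) - cnt f' (s - sum - i) := by
          intro i; rw [H i, if_pos hc, Nat.add_sub_cancel]
        simp only [hb, List.foldl_cons, List.foldl_nil, H1, sub_zero]
        rw [if_pos (⟨by omega, hc.2⟩ : len ≤ 0 ∧ 1 ≤ k), Nat.add_sub_cancel]
        rw [cnt_succ (f' + 1), cnt_succ f']
        ring_nf
      · have H1 : ∀ i : Int, getNumsAux f (len + 1) (sum + i) k s = cnt f (s - sum - i) := by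
          intro i; rw [H i, if_neg hc, sub_zero]
        simp only [hb, List.foldl_cons, List.foldl_nil, H1, sub_zero]
        rw [if_neg (by omega : ¬ (len ≤ 0 ∧ 1 ≤ k))]
        rw [cnt_succ]
        ring_nf

-- B-side: dropping the 'd ≤ v' filter only drops cnt-of-negative terms, which are 0
lemma filter_sum_eq (j v : Nat) (l : List Nat) :
    ((l.filter (fun d => d ≤ v)).map (fun (d : Nat) => cnt j ((v - d : Nat) : Int))).sum
      = (l.map (fun (d : Nat) => cnt j ((v : Int) - (d : Int)))).sum := by
  induction l with
  | nil => rfl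
  | cons d l ihl =>
    by_cases hd : d ≤ v
    · rw [List.filter_cons_of_pos (by simpa using hd), List.map_cons, List.map_cons,
        List.sum_cons, List.sum_cons, ihl]
      have : ((v - d : Nat) : Int) = (v : Int) - (d : Int) := by omega
      rw [this]
    · rw [List.filter_cons_of_neg (by simpa using hd), List.map_cons, List.sum_cons, ihl,
        cnt_neg j _ (by omega), zero_add]

-- one DP round maps the table of cnt j to the table of cnt (j+1)
lemma countStep_map (j tn : Nat) :
    countStep ((List.range (tn + 1)).map (fun (v : Nat) => cnt j (v : Int))) tn
      = (List.range (tn + 1)).map (fun (v : Nat) => cnt (j + 1) (v : Int)) := by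
  unfold countStep
  apply List.map_congr_left
  intro v hv
  rw [List.mem_range] at hv
  rw [PySem.List.foldl_add]
  have hg : ∀ d ∈ (List.range 10).filter (fun d => d ≤ v),
      ((List.range (tn + 1)).map (fun (v : Nat) => cnt j (v : Int))).getD (v - d) 0
        = cnt j ((v - d : Nat) : Int) := by
    intro d _
    exact PySem.List.getD_map_range _ _ _ _ (by omega)
  rw [List.map_congr_left hg, filter_sum_eq, cnt]
  simp

-- the whole DP table after m rounds
lemma dp_invariant (tn m : Nat) :
    (List.range m).foldl (fun dp _ => countStep dp tn) (1 :: List.replicate tn 0)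
      = (List.range (tn + 1)).map (fun (v : Nat) => cnt m (v : Int)) := by
  induction m with
  | zero =>
    simp only [List.range_zero, List.foldl_nil]
    apply List.ext_getElem
    · simp
    · intro i h1 h2
      rcases i with _ | i
      · simp [cnt]
      · simp only [List.getElem_cons_succ, List.getElem_map, List.getElem_range]
        simp [List.getElem_replicate, cnt]
        omega
  | succ m ihm =>
    rw [List.range_succ, List.foldl_append, ihm, List.foldl_cons, List.foldl_nil,
      countStep_map]

lemma countDS_eq (m : Nat) (t : Int) : countDS m t = cnt m t := by
  unfold countDS
  by_cases h : t < 0 ∨ 9 * (m : Int) < t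
  · rw [if_pos h]
    rcases h with h | h
    · exact (cnt_neg m t h).symm
    · exact (cnt_big m t h).symm
  · rw [if_neg h]
    show ((List.range m).foldl (fun dp _ => countStep dp t.toNat)
        (1 :: List.replicate t.toNat 0)).getD t.toNat 0 = cnt m t
    rw [dp_invariant, PySem.List.getD_map_range _ _ _ _ (by omega),
      Int.toNat_of_nonneg (by omega)]

-- ===== VERDICT (by name: the statement is the Claim_ definition above) =====
theorem getNums_spec : Claim_equal_getNums := by
  intro len sum k s _ hpre
  unfold Pre_getNums at hpre
  unfold Spec_getNums getNums getNums_alt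
  rw [if_neg (by omega : ¬ (k - len < 0))]
  rw [getNumsAux_eq _ len sum k s (by omega)]
  by_cases h : len ≤ 0 ∧ 1 ≤ k <;> simp [h, countDS_eq]
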